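-- pv_equiv track=rewrite | github.com/kathrynpotten/AdventOfCode2023 | scripts/01_Trebuchet.py | updated_calibration_values
-- ===== SOURCE A (Python) =====
-- digit_dict = {
--     "one": 1,
--     "two": 2,
--     "three": 3,
--     "four": 4,
--     "five": 5,
--     "six": 6,
--     "seven": 7,
--     "eight": 8,
--     "nine": 9,
-- }
--
-- def updated_calibration_values(input):
--     sum = 0
--     for line in input:
--         indices = {}
--         if any(digit in line for digit in digit_dict):
--             for digit in digit_dict:
--                 check_line = line
--                 while digit in check_line:
--                     indices[check_line.index(digit)] = digit_dict[digit]
--                     check_line = check_line.replace(digit, "z" * len(digit), 1)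
--             for index, element in enumerate(line):
--                 if element.isdigit():
--                     indices[index] = element
--         else:
--             for index, element in enumerate(line):
--                 if element.isdigit():
--                     indices[index] = element
--         sorted_indices = sorted(indices)
--         calibration = str(indices[sorted_indices[0]]) + str(indices[sorted_indices[-1]])
--         sum += int(calibration)
--     return sum
-- ===== SOURCE B (Python) =====
-- digit_dict = {
--     "one": 1,
--     "two": 2,
--     "three": 3,
--     "four": 4,
--     "five": 5,
--     "six": 6,
--     "seven": 7,
--     "eight": 8,
--     "nine": 9,
-- }
--
-- def updated_calibration_values(input):
--     total = 0
--     for line in input: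
--         found = []
--         for i, ch in enumerate(line):
--             if ch.isdigit():
--                 found.append(ch)
--             else:
--                 for word, value in digit_dict.items():
--                     if line.startswith(word, i):
--                         found.append(value)
--                         break
--         total += int(str(found[0]) + str(found[-1]))
--     return total
-- ===== Notes on version B (the rewrite author's own statement) =====
-- stated objective: simpler
-- what changed: Replaces the per-word index/replace-with-z loops, the separate digit scan, and the final sort of dict keys by a single left-to-right scan per line that appends each digit char or spelled word value to a positional list, so the first and last hits are just found[0] and found[-1].
import Mathlib
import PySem

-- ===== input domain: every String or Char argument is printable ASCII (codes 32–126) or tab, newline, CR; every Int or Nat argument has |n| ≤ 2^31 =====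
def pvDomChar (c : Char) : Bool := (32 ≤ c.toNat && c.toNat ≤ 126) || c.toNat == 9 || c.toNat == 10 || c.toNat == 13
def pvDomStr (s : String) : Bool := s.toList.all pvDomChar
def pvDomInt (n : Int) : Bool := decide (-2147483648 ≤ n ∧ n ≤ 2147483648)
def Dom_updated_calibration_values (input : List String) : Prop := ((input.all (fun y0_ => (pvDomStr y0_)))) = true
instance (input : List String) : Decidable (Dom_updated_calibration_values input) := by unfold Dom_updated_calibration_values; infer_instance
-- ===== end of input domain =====

-- B replaces the per-word index/replace loops, the digit scan and the final sort by a single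
-- left-to-right scan per line collecting hits in positional order (objective: simpler).

-- ===== PORT A =====

-- a dict value in A is either an int (from digit_dict) or a one-character string (a digit char)
inductive PyV
  | i : Int → PyV
  | s : Char → PyV
deriving DecidableEq, Repr

-- str(value) for the two shapes of value stored in the dict / list
def pyvStr : PyV → List Char
  | .i n => PySem.Int.toChars n
  | .s c => [c]

def digit_dict : PySem.Dict String Int :=
  ⟨[("one", 1), ("two", 2), ("three", 3), ("four", 4), ("five", 5),
    ("six", 6), ("seven", 7), ("eight", 8), ("nine", 9)]⟩

-- hand port of check_line.replace(digit, new, 1) (PySem.Chars.replace has no count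
-- argument): replace the FIRST occurrence only; exact, incl. the old = "" case
def replaceOnce (cs old new : List Char) : List Char :=
  let i := PySem.Chars.find cs old
  if i = -1 then cs else cs.take i.toNat ++ new ++ cs.drop (i.toNat + old.length)

-- the 'while digit in check_line' loop; the fuel only makes the recursion structural: each
-- step removes one occurrence, so check.length + 1 fuel is never exhausted (whileLoop_spec)
def whileLoop : Nat → PySem.Dict Int PyV → List Char → List Char → Int → PySem.Dict Int PyV
  | 0, d, _, _, _ => d
  | f + 1, d, check, w, v =>
    if PySem.Chars.isIn w check then
      whileLoop f (d.insert (PySem.Chars.find check w) (PyV.i v))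
        (replaceOnce check w (List.replicate w.length 'z')) w v
    else d

-- 'for index, element in enumerate(line): if element.isdigit(): indices[index] = element'
def digitScan (cs : List Char) (d : PySem.Dict Int PyV) : PySem.Dict Int PyV :=
  (PySem.List.enumerate cs).foldl
    (fun d ic => if PySem.Chars.isdigit ic.2 then d.insert ic.1 (PyV.s ic.2) else d) d

def aLine (line : String) : Int :=
  let cs := line.toList
  let indices : PySem.Dict Int PyV :=
    if digit_dict.items.any (fun wv => PySem.Chars.isIn wv.1.toList cs) then
      digitScan cs
        (digit_dict.items.foldl
          (fun d wv => whileLoop (cs.length + 1) d cs wv.1.toList wv.2) PySem.Dict.empty)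
    else
      digitScan cs PySem.Dict.empty
  let sorted_indices := PySem.List.sorted indices.keys (fun k => k)
  -- sorted_indices[0] / sorted_indices[-1]: Python raises IndexError on an empty list;
  -- Pre_ excludes that, the port returns 0 there
  match PySem.List.pyGet? sorted_indices 0, PySem.List.pyGet? sorted_indices (-1) with
  | some k0, some k1 =>
      (PySem.Int.ofChars? (pyvStr (indices.getD k0 (PyV.i 0)) ++
        pyvStr (indices.getD k1 (PyV.i 0)))).getD 0
  | _, _ => 0

def updated_calibration_values (input : List String) : Int :=
  input.foldl (fun sum line => sum + aLine line) 0

-- ===== PORT B =====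

-- the 'for word, value in digit_dict.items(): if line.startswith(word, i): …; break' loop
def firstWord (cs : List Char) (i : Nat) : List (String × Int) → Option Int
  | [] => none
  | wv :: rest =>
    if PySem.Chars.startswith (List.drop i cs) wv.1.toList then some wv.2
    else firstWord cs i rest

def bLine (line : String) : Int :=
  let cs := line.toList
  let found : List PyV :=
    (PySem.List.enumerate cs).foldl
      (fun acc ic =>
        if PySem.Chars.isdigit ic.2 then acc ++ [PyV.s ic.2]
        else
          -- line.startswith(word, i) with 0 ≤ i < len(line) (from enumerate) is word <+: line[i:]
          match firstWord cs ic.1.toNat digit_dict.items with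
          | some v => acc ++ [PyV.i v]
          | none => acc) []
  -- found[0] / found[-1]: IndexError on an empty list, excluded by Pre_
  match PySem.List.pyGet? found 0, PySem.List.pyGet? found (-1) with
  | some a, some b => (PySem.Int.ofChars? (pyvStr a ++ pyvStr b)).getD 0
  | _, _ => 0

def updated_calibration_values_alt (input : List String) : Int :=
  input.foldl (fun total line => total + bLine line) 0

-- ===== PRECONDITION & SPEC =====

-- Pre_ excludes exactly the inputs on which Python A raises IndexError: a line containing
-- neither a digit character nor a spelled digit word (B raises there too).
def Pre_updated_calibration_values (input : List String) : Prop :=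
  ∀ line ∈ input,
    (line.toList.any PySem.Chars.isdigit ||
      digit_dict.items.any (fun wv => PySem.Chars.isIn wv.1.toList line.toList)) = true

instance (input : List String) : Decidable (Pre_updated_calibration_values input) := by
  unfold Pre_updated_calibration_values; infer_instance

def pvWitness_updated_calibration_values : List String := ["one2", "7", "xtwone3x"]

def Spec_updated_calibration_values (input : List String) (out : Int) : Prop :=
  out = updated_calibration_values_alt input

instance (input : List String) (out : Int) : Decidable (Spec_updated_calibration_values input out) := by
  unfold Spec_updated_calibration_values; infer_instance

-- ===== CLAIM (what is proved, stated in full; the proofs are below) =====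
def Claim_equal_updated_calibration_values : Prop :=
  ∀ (input : List String), Dom_updated_calibration_values input →
    Pre_updated_calibration_values input →
    Spec_updated_calibration_values input (updated_calibration_values input)

-- ===== LEMMAS AND PROOFS =====

-- ---- the word table, moved to the List Char level ----

def tbl : List (List Char × Int) :=
  [(['o','n','e'],1),(['t','w','o'],2),(['t','h','r','e','e'],3),(['f','o','u','r'],4),
   (['f','i','v','e'],5),(['s','i','x'],6),(['s','e','v','e','n'],7),
   (['e','i','g','h','t'],8),(['n','i','n','e'],9)]

set_option maxRecDepth 40000 in
theorem tb_items : digit_dict.items.map (fun wv => (wv.1.toList, wv.2)) = tbl := by decide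

theorem mem_tbl {wv : String × Int} (h : wv ∈ digit_dict.items) :
    (wv.1.toList, wv.2) ∈ tbl :=
  tb_items ▸ List.mem_map_of_mem h

theorem tbl_ne : ∀ p ∈ tbl, p.1 ≠ [] := by decide

theorem tbl_noz : ∀ p ∈ tbl, 'z' ∉ p.1 := by decide

theorem tbl_nodigit_b :
    (tbl.all (fun p => p.1.all (fun c => !PySem.Chars.isdigit c))) = true := by decide

theorem tbl_nodigit : ∀ p ∈ tbl, ∀ c ∈ p.1, PySem.Chars.isdigit c = false := by
  have := tbl_nodigit_b
  simp only [List.all_eq_true, Bool.not_eq_eq_eq_not, Bool.not_true] at this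
  exact this

theorem tbl_noborder_b : (tbl.all (fun p => (List.range p.1.length).all
    (fun k => decide (k = 0) || !decide (p.1.drop k <+: p.1)))) = true := by decide

theorem tbl_noborder : ∀ p ∈ tbl, ∀ k < p.1.length, 0 < k → ¬ (p.1.drop k <+: p.1) := by
  have := tbl_noborder_b
  simp only [List.all_eq_true, List.mem_range, Bool.or_eq_true, decide_eq_true_eq,
    Bool.not_eq_eq_eq_not, Bool.not_true, decide_eq_false_iff_not] at this
  intro p hp k hk h0
  rcases this p hp k hk with h | h
  · omega
  · exact h

theorem tbl_noprefix_b : (tbl.all (fun p => tbl.all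
    (fun q => !decide (p.1 <+: q.1) || decide (p = q)))) = true := by decide

theorem tbl_noprefix : ∀ p ∈ tbl, ∀ q ∈ tbl, p.1 <+: q.1 → p = q := by
  have := tbl_noprefix_b
  simp only [List.all_eq_true, Bool.or_eq_true, Bool.not_eq_eq_eq_not, Bool.not_true,
    decide_eq_false_iff_not, decide_eq_true_eq] at this
  intro p hp q hq hpre
  rcases this p hp q hq with h | h
  · exact absurd hpre h
  · exact h

theorem items_eq_of_tbl_eq {p q : String × Int} (_hp : p ∈ digit_dict.items)
    (_hq : q ∈ digit_dict.items) (h : (p.1.toList, p.2) = (q.1.toList, q.2)) : p = q := by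
  obtain ⟨h1, h2⟩ := Prod.mk.injEq .. ▸ h
  exact Prod.ext (String.toList_inj.mp h1) h2

theorem items_nodup : digit_dict.items.Nodup := by decide

-- ---- generic list lemmas ----

theorem prefix_iff_get {α : Type} (w v : List α) :
    w <+: v ↔ w.length ≤ v.length ∧ ∀ t, t < w.length → v[t]? = w[t]? := by
  constructor
  · rintro ⟨r, rfl⟩
    exact ⟨by simp, fun t ht => List.getElem?_append_left ht⟩
  · rintro ⟨hl, h⟩
    rw [List.prefix_iff_eq_take]
    apply List.ext_getElem?
    intro t
    by_cases ht : t < w.length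
    · rw [List.getElem?_take_of_lt ht, h t ht]
    · rw [List.getElem?_eq_none_iff.2 (by omega)]
      simp [List.getElem?_take]
      omega

theorem prefix_drop_iff {α : Type} (w v : List α) (j : Nat) (hw : w ≠ []) :
    w <+: v.drop j ↔ j + w.length ≤ v.length ∧ ∀ t, t < w.length → v[j + t]? = w[t]? := by
  rw [prefix_iff_get]
  have hwpos : 0 < w.length := List.length_pos_iff.mpr hw
  simp only [List.length_drop, List.getElem?_drop]
  constructor
  · rintro ⟨h1, h2⟩
    exact ⟨by omega, h2⟩
  · rintro ⟨h1, h2⟩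
    exact ⟨by omega, h2⟩

theorem enumerate_eq_map {α : Type} [Inhabited α] (cs : List α) (k : Int) :
    PySem.List.enumerate cs k =
      (List.range cs.length).map (fun (i : Nat) => (k + (i : Int), cs.getD i default)) := by
  induction cs generalizing k with
  | nil => rfl
  | cons c cs ih =>
      simp only [PySem.List.enumerate, List.length_cons, List.range_succ_eq_map, List.map_cons,
        List.map_map, ih]
      congr 1
      · simp
      · apply List.map_congr_left
        intro i _
        simp [Function.comp, Nat.succ_eq_add_one]
        omega

theorem foldl_filterMap_append {α β : Type} (l : List α) (f : α → Option β) (a : List β) :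
    l.foldl (fun acc x => ((f x).map (fun v => acc ++ [v])).getD acc) a =
      a ++ l.filterMap f := by
  induction l generalizing a with
  | nil => simp
  | cons x l ih =>
      rw [List.foldl_cons, List.filterMap_cons]
      cases hfx : f x <;> simp [hfx, ih]

theorem filterMap_eq_map_filter {α β : Type} (l : List α) (f : α → Option β) (d : β) :
    l.filterMap f =
      (l.filter (fun x => (f x).isSome)).map (fun x => (f x).getD d) := by
  induction l with
  | nil => rfl
  | cons x l ih =>
      rw [List.filterMap_cons, List.filter_cons]
      cases hfx : f x <;> simp [hfx, ih]

-- ---- occurrence lists ----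

def occL (w cs : List Char) : List Nat :=
  (List.range cs.length).filter (fun i => PySem.Chars.startswith (cs.drop i) w)

theorem mem_occL {w cs : List Char} (hw : w ≠ []) (i : Nat) :
    i ∈ occL w cs ↔ w <+: cs.drop i := by
  simp only [occL, List.mem_filter, List.mem_range, PySem.Chars.startswith_iff]
  constructor
  · exact fun h => h.2
  · intro h
    refine ⟨?_, h⟩
    by_contra hlt
    rw [Nat.not_lt] at hlt
    rw [List.drop_eq_nil_of_le hlt] at h
    exact hw (List.prefix_nil.mp h)

theorem occL_nodup (w cs : List Char) : (occL w cs).Nodup :=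
  (List.nodup_range).filter _

theorem occL_pairwise_lt (w cs : List Char) : (occL w cs).Pairwise (· < ·) :=
  List.Pairwise.sublist List.filter_sublist List.pairwise_lt_range

theorem occL_nil_iff {w cs : List Char} (hw : w ≠ []) :
    occL w cs = [] ↔ PySem.Chars.isIn w cs = false := by
  constructor
  · intro h
    rw [← Bool.not_eq_true]
    intro hin
    obtain ⟨j, hj⟩ := (PySem.Chars.exists_prefix_drop_iff_isIn w cs).mpr hin
    have hmem := (mem_occL hw j).mpr hj
    simp [h] at hmem
  · intro h
    rw [List.eq_nil_iff_forall_not_mem]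
    intro j hj
    have hpre := (mem_occL hw j).mp hj
    have h2 : PySem.Chars.isIn w cs = true :=
      (PySem.Chars.exists_prefix_drop_iff_isIn w cs).mp ⟨j, hpre⟩
    rw [h] at h2
    cases h2

-- ---- replaceOnce ----

theorem find_nonneg_of_isIn {w check : List Char} (hin : PySem.Chars.isIn w check = true) :
    0 ≤ PySem.Chars.find check w := by
  have h1 := PySem.Chars.neg_one_le_find check w
  have h2 : PySem.Chars.find check w ≠ -1 :=
    (PySem.Chars.find_ne_neg_one_iff check w).mpr ((PySem.Chars.isIn_iff_infix w check).mp hin)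
  omega

theorem occ_bound {w check : List Char} {i0 : Nat} (h : w <+: check.drop i0) (hw : w ≠ []) :
    i0 + w.length ≤ check.length := by
  have := (prefix_iff_get w (check.drop i0)).mp h
  have hlen := this.1
  rw [List.length_drop] at hlen
  have : w.length ≠ 0 := fun h0 => hw (List.length_eq_zero_iff.mp h0)
  omega

theorem replaceOnce_get {w check : List Char} (hin : PySem.Chars.isIn w check = true)
    (hw : w ≠ []) (j : Nat) :
    (replaceOnce check w (List.replicate w.length 'z'))[j]? =
      if j < (PySem.Chars.find check w).toNat then check[j]?
      else if j < (PySem.Chars.find check w).toNat + w.length then some 'z'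
      else check[j]? := by
  have hf := find_nonneg_of_isIn hin
  set i0 := (PySem.Chars.find check w).toNat with hi0
  have hocc : w <+: check.drop i0 := (PySem.Chars.find_spec hf).1
  have hle : i0 + w.length ≤ check.length := occ_bound hocc hw
  have hne : PySem.Chars.find check w ≠ -1 := by omega
  rw [replaceOnce]
  simp only [hne, if_false]
  have hlt : (check.take i0).length = i0 := by
    rw [List.length_take]; omega
  have hlen12 : (check.take i0 ++ List.replicate w.length 'z').length = i0 + w.length := by
    rw [List.length_append, hlt, List.length_replicate]
  by_cases h1 : j < i0
  · rw [List.getElem?_append_left (by rw [hlen12]; omega),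
      List.getElem?_append_left (by rw [hlt]; omega), List.getElem?_take_of_lt h1]
    simp [h1]
  · by_cases h2 : j < i0 + w.length
    · rw [List.getElem?_append_left (by rw [hlen12]; omega),
        List.getElem?_append_right (by rw [hlt]; omega)]
      rw [hlt, List.getElem?_replicate]
      simp only [h1, if_false, h2, if_true]
      rw [if_pos (by omega)]
    · rw [List.getElem?_append_right (by rw [hlen12]; omega), hlen12, List.getElem?_drop]
      simp only [h1, if_false, h2, if_false]
      congr 1
      omega

theorem replaceOnce_length {w check : List Char} (hin : PySem.Chars.isIn w check = true)
    (hw : w ≠ []) :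
    (replaceOnce check w (List.replicate w.length 'z')).length = check.length := by
  have hf := find_nonneg_of_isIn hin
  set i0 := (PySem.Chars.find check w).toNat with hi0
  have hocc : w <+: check.drop i0 := (PySem.Chars.find_spec hf).1
  have hle : i0 + w.length ≤ check.length := occ_bound hocc hw
  have hne : PySem.Chars.find check w ≠ -1 := by omega
  rw [replaceOnce]
  simp only [hne, if_false]
  simp [List.length_append, List.length_take, List.length_drop]
  omega

theorem occ_replaceOnce_iff {w check : List Char} (hin : PySem.Chars.isIn w check = true)
    (hw : w ≠ []) (hz : 'z' ∉ w)
    (hb : ∀ k < w.length, 0 < k → ¬ (w.drop k <+: w)) (j : Nat) :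
    w <+: (replaceOnce check w (List.replicate w.length 'z')).drop j ↔
      (w <+: check.drop j ∧ j ≠ (PySem.Chars.find check w).toNat) := by
  have hf := find_nonneg_of_isIn hin
  set R := replaceOnce check w (List.replicate w.length 'z') with hR
  set i0 := (PySem.Chars.find check w).toNat with hi0
  have hocc : w <+: check.drop i0 := (PySem.Chars.find_spec hf).1
  have hfirst : ∀ i, i < i0 → ¬ w <+: check.drop i := (PySem.Chars.find_spec hf).2
  have hle : i0 + w.length ≤ check.length := occ_bound hocc hw
  have hRlen : R.length = check.length := replaceOnce_length hin hw
  have hget := replaceOnce_get hin hw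
  have hwpos : 0 < w.length := List.length_pos_iff.mpr hw
  constructor
  · intro h
    obtain ⟨h1, h2⟩ := (prefix_drop_iff w R j hw).mp h
    rw [hRlen] at h1
    by_cases hov : j + w.length ≤ i0 ∨ i0 + w.length ≤ j
    · refine ⟨(prefix_drop_iff w check j hw).mpr ⟨h1, fun t ht => ?_⟩, by omega⟩
      have := h2 t ht
      rw [hget (j + t)] at this
      rcases hov with hov | hov
      · rwa [if_pos (by omega)] at this
      · rwa [if_neg (by omega), if_neg (by omega)] at this
    · exfalso
      rw [not_or] at hov
      set t := if j ≤ i0 then i0 - j else 0 with htdef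
      have ht : t < w.length ∧ i0 ≤ j + t ∧ j + t < i0 + w.length := by
        rw [htdef]; split <;> omega
      have hz' := h2 t ht.1
      rw [hget (j + t), if_neg (by omega), if_pos (by omega)] at hz'
      rw [List.getElem?_eq_getElem ht.1] at hz'
      have : w[t] = 'z' := Option.some_injective _ hz'.symm
      exact hz (this ▸ List.getElem_mem ht.1)
  · rintro ⟨h, hne⟩
    obtain ⟨h1, h2⟩ := (prefix_drop_iff w check j hw).mp h
    have hjge : i0 ≤ j := by
      by_contra hlt
      exact hfirst j (by omega) h
    have hjge' : i0 + w.length ≤ j := by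
      by_contra hlt
      have hk : 0 < j - i0 ∧ j - i0 < w.length := by omega
      apply hb (j - i0) hk.2 hk.1
      have hdl : (w.drop (j - i0)).length = w.length - (j - i0) := List.length_drop ..
      rw [prefix_iff_get]
      refine ⟨by omega, fun t ht => ?_⟩
      rw [hdl] at ht
      rw [List.getElem?_drop]
      obtain ⟨g1, g2⟩ := (prefix_drop_iff w check i0 hw).mp hocc
      have e1 : check[i0 + (j - i0 + t)]? = w[j - i0 + t]? := g2 _ (by omega)
      have e2 : check[j + t]? = w[t]? := h2 t (by omega)
      have e3 : i0 + (j - i0 + t) = j + t := by omega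
      rw [e3] at e1
      rw [← e1, e2]
    rw [prefix_drop_iff w R j hw, hRlen]
    refine ⟨h1, fun t ht => ?_⟩
    rw [hget (j + t), if_neg (by omega), if_neg (by omega)]
    exact h2 t ht

theorem pairwise_min_cons {i0 : Nat} {O : List Nat} (h : O.Pairwise (· < ·)) (hm : i0 ∈ O)
    (hmin : ∀ j ∈ O, i0 ≤ j) : O = i0 :: O.filter (fun j => decide (j ≠ i0)) := by
  cases O with
  | nil => cases hm
  | cons a t =>
      have ha : a = i0 := by
        rcases List.mem_cons.mp hm with h' | h'
        · omega
        · have h1 := (List.pairwise_cons.mp h).1 _ h'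
          have h2 := hmin a List.mem_cons_self
          omega
      subst ha
      have hall : ∀ j ∈ t, a < j := (List.pairwise_cons.mp h).1
      have hfe : t.filter (fun j => decide (j ≠ a)) = t :=
        List.filter_eq_self.mpr fun j hj => by
          have := hall j hj
          simp only [ne_eq, decide_eq_true_eq]
          omega
      rw [List.filter_cons, if_neg (by simp), hfe]

theorem occL_replaceOnce {w check : List Char} (hin : PySem.Chars.isIn w check = true)
    (hw : w ≠ []) (hz : 'z' ∉ w)
    (hb : ∀ k < w.length, 0 < k → ¬ (w.drop k <+: w)) :
    occL w check =
      (PySem.Chars.find check w).toNat ::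
        occL w (replaceOnce check w (List.replicate w.length 'z')) := by
  have hf := find_nonneg_of_isIn hin
  set R := replaceOnce check w (List.replicate w.length 'z') with hR
  set i0 := (PySem.Chars.find check w).toNat with hi0
  have hocc : w <+: check.drop i0 := (PySem.Chars.find_spec hf).1
  have hfirst : ∀ i, i < i0 → ¬ w <+: check.drop i := (PySem.Chars.find_spec hf).2
  have hRlen : R.length = check.length := replaceOnce_length hin hw
  have hstep : occL w R = (occL w check).filter (fun j => decide (j ≠ i0)) := by
    rw [occL, occL, hRlen, List.filter_filter]
    apply List.filter_congr
    intro j _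
    have hiff := occ_replaceOnce_iff hin hw hz hb j
    rw [← hi0, ← hR] at hiff
    rw [Bool.eq_iff_iff]
    simp only [PySem.Chars.startswith_iff, Bool.and_eq_true, decide_eq_true_eq, hiff]
    tauto
  rw [hstep]
  apply pairwise_min_cons (occL_pairwise_lt w check)
  · exact (mem_occL hw i0).mpr hocc
  · intro j hj
    by_contra hlt
    exact hfirst j (by omega) ((mem_occL hw j).mp hj)

theorem whileLoop_spec {w : List Char} (hw : w ≠ []) (hz : 'z' ∉ w)
    (hb : ∀ k < w.length, 0 < k → ¬ (w.drop k <+: w)) (v : Int) :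
    ∀ fuel check d, (occL w check).length < fuel →
      whileLoop fuel d check w v =
        (occL w check).foldl (fun d (i : Nat) => d.insert (i : Int) (PyV.i v)) d := by
  intro fuel
  induction fuel with
  | zero => intro check d h; omega
  | succ f ih =>
      intro check d h
      rw [whileLoop]
      cases hin : PySem.Chars.isIn w check with
      | false =>
          rw [(occL_nil_iff hw).mpr hin]
          rfl
      | true =>
          simp only [if_true]
          have hrw := occL_replaceOnce hin hw hz hb
          have hf := find_nonneg_of_isIn hin
          have hcast : ((PySem.Chars.find check w).toNat : Int) = PySem.Chars.find check w :=
            Int.toNat_of_nonneg hf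
          rw [hrw, List.foldl_cons, hcast]
          rw [hrw] at h
          exact ih _ _ (by simpa using Nat.lt_of_succ_lt_succ h)

-- ---- the per-position hit function and the hit lists ----

def hitAt (cs : List Char) (i : Nat) : Option PyV :=
  match cs[i]? with
  | none => none
  | some c =>
    if PySem.Chars.isdigit c then some (PyV.s c)
    else (firstWord cs i digit_dict.items).map PyV.i

def hv (cs : List Char) (i : Nat) : PyV := (hitAt cs i).getD (PyV.i 0)

def hitPos (cs : List Char) : List Nat :=
  (List.range cs.length).filter (fun i => (hitAt cs i).isSome)

def pairsW (cs : List Char) : List (Int × PyV) :=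
  digit_dict.items.flatMap
    (fun wv => (occL wv.1.toList cs).map (fun (i : Nat) => ((i : Int), PyV.i wv.2)))

def pairsD (cs : List Char) : List (Int × PyV) :=
  ((List.range cs.length).filter (fun i => PySem.Chars.isdigit (cs.getD i (default : Char)))).map
    (fun (i : Nat) => ((i : Int), PyV.s (cs.getD i (default : Char))))

def pairs (cs : List Char) : List (Int × PyV) := pairsW cs ++ pairsD cs

def hitList (cs : List Char) : List (Int × PyV) :=
  (hitPos cs).map (fun (i : Nat) => ((i : Int), hv cs i))

theorem firstWord_some {cs : List Char} {i : Nat} {v : Int}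
    (l : List (String × Int)) (h : firstWord cs i l = some v) :
    ∃ wv ∈ l, PySem.Chars.startswith (cs.drop i) wv.1.toList = true ∧ wv.2 = v := by
  induction l with
  | nil => cases h
  | cons q rest ih =>
      rw [firstWord] at h
      by_cases hq : PySem.Chars.startswith (cs.drop i) q.1.toList
      · rw [if_pos hq] at h
        exact ⟨q, List.mem_cons_self, hq, Option.some_injective _ h⟩
      · rw [if_neg hq] at h
        obtain ⟨wv, hm, hs, hv⟩ := ih h
        exact ⟨wv, List.mem_cons_of_mem _ hm, hs, hv⟩

theorem firstWord_eq {cs : List Char} {i : Nat} {wv : String × Int}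
    (l : List (String × Int)) (hsub : ∀ p ∈ l, p ∈ digit_dict.items)
    (hm : wv ∈ l) (hw : wv.1.toList <+: cs.drop i) :
    firstWord cs i l = some wv.2 := by
  induction l with
  | nil => cases hm
  | cons q rest ih =>
      rw [firstWord]
      by_cases hq : PySem.Chars.startswith (List.drop i cs) q.1.toList
      · rw [if_pos hq]
        have hq' : q.1.toList <+: cs.drop i := (PySem.Chars.startswith_iff _ _).mp hq
        have hqt := mem_tbl (hsub q List.mem_cons_self)
        have hwt := mem_tbl (hsub wv hm)
        have heq : (q.1.toList, q.2) = (wv.1.toList, wv.2) := by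
          rcases List.prefix_or_prefix_of_prefix hq' hw with hc | hc
          · exact tbl_noprefix _ hqt _ hwt hc
          · exact (tbl_noprefix _ hwt _ hqt hc).symm
        have h2 : q.2 = wv.2 := (Prod.ext_iff.mp heq).2
        rw [h2]
      · rw [if_neg hq]
        rcases List.mem_cons.mp hm with rfl | hm'
        · exact absurd ((PySem.Chars.startswith_iff _ _).mpr hw) (by simp [hq])
        · exact ih (fun p hp => hsub p (List.mem_cons_of_mem _ hp)) hm'

theorem occ_char {cs : List Char} {wv : String × Int} (hm : wv ∈ digit_dict.items)
    {i : Nat} (hi : i ∈ occL wv.1.toList cs) :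
    i < cs.length ∧ cs[i]? = wv.1.toList[0]? ∧
      PySem.Chars.isdigit (cs.getD i (default : Char)) = false := by
  have htl := mem_tbl hm
  have hne : wv.1.toList ≠ [] := tbl_ne _ htl
  have hwpos : 0 < wv.1.toList.length := List.length_pos_iff.mpr hne
  have hilt : i < cs.length := by
    have := List.mem_filter.mp hi
    exact List.mem_range.mp this.1
  have hpre := (mem_occL hne i).mp hi
  obtain ⟨h1, h2⟩ := (prefix_drop_iff _ cs i hne).mp hpre
  have hget : cs[i]? = wv.1.toList[0]? := by
    have := h2 0 hwpos
    simpa using this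
  refine ⟨hilt, hget, ?_⟩
  rw [List.getD_eq_getElem?_getD, hget, List.getElem?_eq_getElem hwpos]
  simp only [Option.getD_some]
  exact tbl_nodigit _ htl _ (List.getElem_mem hwpos)

theorem hit_word {cs : List Char} {wv : String × Int} (hm : wv ∈ digit_dict.items)
    {i : Nat} (hi : i ∈ occL wv.1.toList cs) : hitAt cs i = some (PyV.i wv.2) := by
  obtain ⟨hilt, hget, hnd⟩ := occ_char hm hi
  have hne : wv.1.toList ≠ [] := tbl_ne _ (mem_tbl hm)
  have hwpos : 0 < wv.1.toList.length := List.length_pos_iff.mpr hne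
  have hpre := (mem_occL hne i).mp hi
  have hdig : PySem.Chars.isdigit wv.1.toList[0] = false :=
    tbl_nodigit _ (mem_tbl hm) _ (List.getElem_mem hwpos)
  rw [hitAt, hget, List.getElem?_eq_getElem hwpos]
  simp only [hdig, Bool.false_eq_true, if_false]
  rw [firstWord_eq digit_dict.items (fun p hp => hp) hm hpre]
  rfl

theorem mem_hitList {cs : List Char} {i : Nat} {w : PyV} (hi : i < cs.length)
    (h : hitAt cs i = some w) : ((i : Int), w) ∈ hitList cs := by
  have : i ∈ hitPos cs := by
    rw [hitPos, List.mem_filter, List.mem_range]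
    exact ⟨hi, by rw [h]; rfl⟩
  have hvw : hv cs i = w := by rw [hv, h]; rfl
  rw [hitList]
  exact hvw ▸ List.mem_map_of_mem this

theorem mem_pairs_iff (cs : List Char) (p : Int × PyV) :
    p ∈ pairs cs ↔ p ∈ hitList cs := by
  constructor
  · intro hp
    rcases List.mem_append.mp hp with hp | hp
    · obtain ⟨wv, hwv, hp⟩ := List.mem_flatMap.mp hp
      obtain ⟨i, hi, rfl⟩ := List.mem_map.mp hp
      exact mem_hitList (occ_char hwv hi).1 (hit_word hwv hi)
    · obtain ⟨i, hi, rfl⟩ := List.mem_map.mp hp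
      obtain ⟨hir, hid⟩ := List.mem_filter.mp hi
      have hilt : i < cs.length := List.mem_range.mp hir
      have hc : cs[i]? = some (cs.getD i (default : Char)) := by
        rw [List.getD_eq_getElem?_getD, List.getElem?_eq_getElem hilt]
        rfl
      apply mem_hitList hilt
      rw [hitAt, hc]
      simp only [hid, if_true]
  · intro hp
    obtain ⟨i, hi, rfl⟩ := List.mem_map.mp hp
    obtain ⟨hir, his⟩ := List.mem_filter.mp hi
    have hilt : i < cs.length := List.mem_range.mp hir
    have hc : cs[i]? = some cs[i] := List.getElem?_eq_getElem hilt
    have hgetD : cs.getD i (default : Char) = cs[i] := by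
      rw [List.getD_eq_getElem?_getD, hc]; rfl
    by_cases hd : PySem.Chars.isdigit cs[i]
    · have hh : hitAt cs i = some (PyV.s cs[i]) := by
        rw [hitAt, hc]
        simp only [hd, if_true]
      have hvv : hv cs i = PyV.s cs[i] := by rw [hv, hh]; rfl
      apply List.mem_append.mpr
      right
      rw [pairsD]
      refine List.mem_map.mpr ⟨i, List.mem_filter.mpr ⟨hir, by rw [hgetD]; exact hd⟩, ?_⟩
      rw [hvv, hgetD]
    · have hfs : (hitAt cs i).isSome := his
      rw [hitAt, hc] at hfs
      simp only [hd, Bool.false_eq_true, if_false] at hfs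
      obtain ⟨v, hvv⟩ := Option.isSome_iff_exists.mp hfs
      obtain ⟨v0, hfw, rfl⟩ := Option.map_eq_some_iff.mp hvv
      obtain ⟨wv, hwm, hsw, rfl⟩ := firstWord_some _ hfw
      have hh : hv cs i = PyV.i wv.2 := by
        rw [hv, hitAt, hc]
        simp only [hd, Bool.false_eq_true, if_false, hfw]
        rfl
      apply List.mem_append.mpr
      left
      rw [pairsW]
      apply List.mem_flatMap.mpr
      refine ⟨wv, hwm, List.mem_map.mpr ⟨i, ?_, by rw [hh]⟩⟩
      rw [occL, List.mem_filter]
      exact ⟨hir, hsw⟩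

theorem occL_disjoint {cs : List Char} {p q : String × Int} (hp : p ∈ digit_dict.items)
    (hq : q ∈ digit_dict.items) (hne : p ≠ q) :
    List.Disjoint (occL p.1.toList cs) (occL q.1.toList cs) := by
  intro i hip hiq
  have hpe : p.1.toList ≠ [] := tbl_ne _ (mem_tbl hp)
  have hqe : q.1.toList ≠ [] := tbl_ne _ (mem_tbl hq)
  have h1 := (mem_occL hpe i).mp hip
  have h2 := (mem_occL hqe i).mp hiq
  have heq : (p.1.toList, p.2) = (q.1.toList, q.2) := by
    rcases List.prefix_or_prefix_of_prefix h1 h2 with hc | hc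
    · exact tbl_noprefix _ (mem_tbl hp) _ (mem_tbl hq) hc
    · exact (tbl_noprefix _ (mem_tbl hq) _ (mem_tbl hp) hc).symm
  exact hne (items_eq_of_tbl_eq hp hq heq)

theorem keys_nodup (cs : List Char) : ((pairs cs).map Prod.fst).Nodup := by
  rw [pairs, List.map_append]
  apply List.Nodup.append
  · rw [pairsW, List.map_flatMap]
    rw [List.nodup_flatMap]
    constructor
    · intro wv _
      rw [List.map_map]
      exact (occL_nodup _ _).map (fun a b h => by simpa using h)
    · apply List.Nodup.pairwise_of_forall_ne items_nodup
      intro p hp q hq hne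
      intro x hxp hxq
      simp only [List.map_map, List.mem_map, Function.comp] at hxp hxq
      obtain ⟨i, hi, hxi⟩ := hxp
      obtain ⟨j, hj, hxj⟩ := hxq
      have hij : i = j := by
        rw [← hxj] at hxi
        exact_mod_cast hxi
      subst hij
      exact occL_disjoint hp hq hne hi hj
  · rw [pairsD, List.map_map]
    refine List.Nodup.map (fun a b h => by simpa using h) ?_
    exact List.nodup_range.filter _
  · intro x hxw hxd
    rw [pairsW, List.map_flatMap] at hxw
    simp only [List.mem_flatMap, List.map_map, List.mem_map, Function.comp] at hxw
    obtain ⟨wv, hwv, i, hi, hxi⟩ := hxw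
    rw [pairsD] at hxd
    simp only [List.map_map, List.mem_map, Function.comp] at hxd
    obtain ⟨j, hj, hxj⟩ := hxd
    have hij : i = j := by
      rw [← hxj] at hxi
      exact_mod_cast hxi
    subst hij
    have hnd := (occ_char hwv hi).2.2
    have hd := (List.mem_filter.mp hj).2
    rw [hnd] at hd
    cases hd

theorem hitList_nodup (cs : List Char) : (hitList cs).Nodup := by
  rw [hitList]
  apply List.Nodup.map_on
  · intro x _ y _ h
    have h1 : ((x : Int)) = (y : Int) := by simpa using congrArg Prod.fst h
    exact_mod_cast h1
  · exact List.nodup_range.filter _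

theorem pairs_perm (cs : List Char) : (pairs cs).Perm (hitList cs) := by
  rw [List.perm_ext_iff_of_nodup (List.Nodup.of_map _ (keys_nodup cs)) (hitList_nodup cs)]
  exact mem_pairs_iff cs

theorem getD_mk_of_nodup {l : List (Int × PyV)} (hnd : (l.map Prod.fst).Nodup)
    {k : Int} {v : PyV} (hm : (k, v) ∈ l) (dflt : PyV) :
    (PySem.Dict.mk l).getD k dflt = v := by
  induction l with
  | nil => cases hm
  | cons p t ih =>
      rw [List.map_cons, List.nodup_cons] at hnd
      rw [PySem.Dict.getD, PySem.Dict.get?]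
      by_cases hpk : p.1 = k
      · have hpv : p = (k, v) := by
          rcases List.mem_cons.mp hm with h | h
          · exact h.symm
          · exfalso
            apply hnd.1
            rw [hpk]
            exact List.mem_map.mpr ⟨(k, v), h, rfl⟩
        rw [List.find?_cons_of_pos (by simp [hpk]), hpv]
        rfl
      · rw [List.find?_cons_of_neg (by simp [hpk])]
        have hm' : (k, v) ∈ t := by
          rcases List.mem_cons.mp hm with h | h
          · exact absurd (by rw [← h] : p.1 = k) hpk
          · exact h
        have := ih hnd.2 hm'
        rw [PySem.Dict.getD, PySem.Dict.get?] at this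
        exact this

theorem indices_eq (cs : List Char) :
    (pairs cs).foldl (fun d p => d.insert p.1 p.2) (PySem.Dict.empty : PySem.Dict Int PyV) =
      PySem.Dict.mk (pairs cs) := by
  apply PySem.Dict.ext
  have := PySem.Dict.items_foldl_insert_fresh (pairs cs) Prod.fst Prod.snd
    (PySem.Dict.empty : PySem.Dict Int PyV)
    (fun a _ => by simp [PySem.Dict.contains, PySem.Dict.empty]) (keys_nodup cs)
  simpa [PySem.Dict.empty] using this

theorem sorted_keys (cs : List Char) :
    PySem.List.sorted (PySem.Dict.mk (pairs cs)).keys (fun k => k) =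
      (hitPos cs).map (fun (i : Nat) => (i : Int)) := by
  apply PySem.List.sorted_eq_of_perm_of_pairwise_lt
  · have h1 : (hitPos cs).map (fun (i : Nat) => (i : Int)) = (hitList cs).map Prod.fst := by
      rw [hitList, List.map_map]
      rfl
    have h2 : (PySem.Dict.mk (pairs cs)).keys = (pairs cs).map Prod.fst := rfl
    rw [h1, h2]
    exact ((pairs_perm cs).map Prod.fst).symm
  · have hpl : (hitPos cs).Pairwise (· < ·) :=
      List.Pairwise.sublist List.filter_sublist List.pairwise_lt_range
    exact List.Pairwise.map _ (fun a b h => by exact_mod_cast h) hpl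

theorem pyGet?_neg_one {α : Type} (xs : List α) :
    PySem.List.pyGet? xs (-1) = xs.getLast? := by
  cases xs with
  | nil => rfl
  | cons a t =>
      rw [List.getLast?_eq_getElem?]
      simp [PySem.List.pyGet?, PySem.List.pyIdx?]

theorem digitScan_eq (cs : List Char) (d : PySem.Dict Int PyV) :
    digitScan cs d = (pairsD cs).foldl (fun d p => d.insert p.1 p.2) d := by
  rw [digitScan, enumerate_eq_map cs 0, List.foldl_map, pairsD, List.foldl_map]
  have hz : ∀ (i : Nat), ((0 : Int) + (i : Int)) = (i : Int) := fun i => by omega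
  simp only [hz]
  exact PySem.List.foldl_if_eq_foldl_filter
    (fun (i : Nat) => PySem.Chars.isdigit (cs.getD i (default : Char)))
    (fun d (i : Nat) => d.insert (i : Int) (PyV.s (cs.getD i (default : Char))))
    (List.range cs.length) d

theorem wordFold_eq (cs : List Char) :
    digit_dict.items.foldl
        (fun d wv => whileLoop (cs.length + 1) d cs wv.1.toList wv.2) PySem.Dict.empty =
      (pairsW cs).foldl (fun d p => d.insert p.1 p.2) PySem.Dict.empty := by
  rw [pairsW, List.foldl_flatMap]
  apply PySem.List.foldl_congr_mem
  intro d wv hm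
  have htl := mem_tbl hm
  have hne : wv.1.toList ≠ [] := tbl_ne _ htl
  have hfuel : (occL wv.1.toList cs).length < cs.length + 1 := by
    have : (occL wv.1.toList cs).length ≤ (List.range cs.length).length :=
      List.length_filter_le _ _
    rw [List.length_range] at this
    omega
  rw [whileLoop_spec hne (tbl_noz _ htl)
    (fun k hk h0 => tbl_noborder _ htl k hk h0) wv.2 _ cs d hfuel]
  rw [List.foldl_map]

theorem aLine_indices (cs : List Char) :
    (if digit_dict.items.any (fun wv => PySem.Chars.isIn wv.1.toList cs) then
      digitScan cs
        (digit_dict.items.foldl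
          (fun d wv => whileLoop (cs.length + 1) d cs wv.1.toList wv.2) PySem.Dict.empty)
    else
      digitScan cs PySem.Dict.empty) = PySem.Dict.mk (pairs cs) := by
  cases hany : digit_dict.items.any (fun wv => PySem.Chars.isIn wv.1.toList cs) with
  | true =>
      rw [if_pos rfl]
      rw [wordFold_eq, digitScan_eq, ← List.foldl_append, ← pairs, indices_eq]
  | false =>
      rw [if_neg (by simp)]
      have hW : pairsW cs = [] := by
        rw [pairsW, List.flatMap_eq_nil_iff]
        intro wv hm
        have hne : wv.1.toList ≠ [] := tbl_ne _ (mem_tbl hm)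
        have hin : PySem.Chars.isIn wv.1.toList cs = false := by
          have := List.any_eq_false.mp hany wv hm
          simpa using this
        rw [(occL_nil_iff hne).mpr hin]
        rfl
      rw [digitScan_eq, ← indices_eq cs, pairs, hW, List.nil_append]

theorem found_eq (cs : List Char) :
    (PySem.List.enumerate cs).foldl
      (fun acc ic =>
        if PySem.Chars.isdigit ic.2 then acc ++ [PyV.s ic.2]
        else
          match firstWord cs ic.1.toNat digit_dict.items with
          | some v => acc ++ [PyV.i v]
          | none => acc) ([] : List PyV) = (hitPos cs).map (hv cs) := by
  rw [enumerate_eq_map cs 0, List.foldl_map]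
  have hbody : ∀ (acc : List PyV) (i : Nat), i ∈ List.range cs.length →
      (if PySem.Chars.isdigit (cs.getD i default) then acc ++ [PyV.s (cs.getD i default)]
       else
         match firstWord cs ((0 : Int) + (i : Int)).toNat digit_dict.items with
         | some v => acc ++ [PyV.i v]
         | none => acc) =
      (((hitAt cs i).map (fun v => acc ++ [v])).getD acc) := by
    intro acc i hi
    have hilt : i < cs.length := List.mem_range.mp hi
    have hc : cs[i]? = some cs[i] := List.getElem?_eq_getElem hilt
    have hgetD : cs.getD i default = cs[i] := by
      rw [List.getD_eq_getElem?_getD, hc]; rfl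
    have htn : ((0 : Int) + (i : Int)).toNat = i := by omega
    have hh : hitAt cs i =
        (if PySem.Chars.isdigit cs[i] then some (PyV.s cs[i])
         else (firstWord cs i digit_dict.items).map PyV.i) := by
      rw [hitAt, hc]
    rw [hgetD, htn, hh]
    by_cases hd : PySem.Chars.isdigit cs[i]
    · simp [hd]
    · simp only [hd, Bool.false_eq_true, if_false]
      cases firstWord cs i digit_dict.items <;> simp
  rw [PySem.List.foldl_congr_mem _ _ _ _ hbody]
  rw [foldl_filterMap_append, List.nil_append,
    filterMap_eq_map_filter (List.range cs.length) (hitAt cs) (PyV.i 0)]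
  rfl

theorem line_eq (line : String) : aLine line = bLine line := by
  rw [aLine, bLine]
  rw [aLine_indices line.toList, found_eq line.toList, sorted_keys line.toList]
  cases hp : hitPos line.toList with
  | nil => rfl
  | cons i t =>
      have hnn : (i :: t) ≠ ([] : List Nat) := by simp
      set j := (i :: t).getLast hnn with hj
      have hlast : (i :: t).getLast? = some j := List.getLast?_eq_some_getLast hnn
      have hjm : j ∈ (i :: t) := hj ▸ List.getLast_mem hnn
      have him : i ∈ (i :: t) := List.mem_cons_self
      have hg0c : PySem.List.pyGet? ((i :: t).map (fun (k : Nat) => (k : Int))) 0 =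
          some ((i : Nat) : Int) := by
        have h0 := PySem.List.pyGet?_natCast ((i :: t).map (fun (k : Nat) => (k : Int))) 0
        simpa using h0
      have hg1c : PySem.List.pyGet? ((i :: t).map (fun (k : Nat) => (k : Int))) (-1) =
          some ((j : Nat) : Int) := by
        rw [pyGet?_neg_one, List.getLast?_map, hlast]
        rfl
      have hg0v : PySem.List.pyGet? ((i :: t).map (hv line.toList)) 0 =
          some (hv line.toList i) := by
        have h0 := PySem.List.pyGet?_natCast ((i :: t).map (hv line.toList)) 0
        simpa using h0
      have hg1v : PySem.List.pyGet? ((i :: t).map (hv line.toList)) (-1) =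
          some (hv line.toList j) := by
        rw [pyGet?_neg_one, List.getLast?_map, hlast]
        rfl
      rw [hg0c, hg1c, hg0v, hg1v]
      have hmemP : ∀ k : Nat, k ∈ hitPos line.toList →
          ((k : Int), hv line.toList k) ∈ pairs line.toList := by
        intro k hk
        rw [mem_pairs_iff, hitList]
        exact List.mem_map_of_mem hk
      have hgi := getD_mk_of_nodup (keys_nodup line.toList)
        (hmemP i (hp ▸ him)) (PyV.i 0)
      have hgj := getD_mk_of_nodup (keys_nodup line.toList)
        (hmemP j (hp ▸ hjm)) (PyV.i 0)
      simp only [hgi, hgj]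

-- ===== VERDICT (by name: the statement is the Claim_ definition above) =====
theorem updated_calibration_values_spec : Claim_equal_updated_calibration_values := by
  unfold Claim_equal_updated_calibration_values
  intro input _ _
  unfold Spec_updated_calibration_values
  unfold updated_calibration_values updated_calibration_values_alt
  simp only [line_eq]
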